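-- pv_equiv track=rewrite | github.com/How-We-Growth/Algorithm | programmers/lv1/82612. 부족한 금액 계산하기/부족한 금액 계산하기.py | solution
-- ===== SOURCE A (Python) =====
-- def solution(price, money, count):
--     final_price = 0
--     for i in range(1, count+1):
--         final_price += i*price
--     answer = final_price - money
--     if answer < 0:
--         return 0
--     return answer
-- ===== SOURCE B (Python) =====
-- def solution(price, money, count):
--     n = count if count > 0 else 0
--     total = price * n * (n + 1) // 2
--     shortfall = total - money
--     return shortfall if shortfall > 0 else 0
-- ===== Notes on version B (the rewrite author's own statement) =====
-- stated objective: faster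
-- what changed: Replaced the O(count) accumulation loop with the closed-form triangular-number formula price*count*(count+1)//2, clamping count at 0.
import Mathlib
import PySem

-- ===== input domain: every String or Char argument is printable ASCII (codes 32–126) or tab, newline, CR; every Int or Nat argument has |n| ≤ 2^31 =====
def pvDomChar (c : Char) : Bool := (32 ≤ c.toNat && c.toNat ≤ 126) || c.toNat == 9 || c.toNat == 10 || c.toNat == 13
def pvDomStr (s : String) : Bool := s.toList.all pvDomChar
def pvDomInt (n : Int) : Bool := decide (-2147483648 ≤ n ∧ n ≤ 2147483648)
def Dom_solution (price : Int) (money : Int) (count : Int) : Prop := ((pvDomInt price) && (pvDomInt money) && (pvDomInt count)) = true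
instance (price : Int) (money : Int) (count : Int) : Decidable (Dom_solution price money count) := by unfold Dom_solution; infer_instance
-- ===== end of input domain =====

-- B replaces A's O(count) accumulation loop by the closed-form triangular sum (O(1)); return values proved equal.

-- ===== PORT A =====
def solution (price : Int) (money : Int) (count : Int) : Int :=
  let final_price : Int :=
    (PySem.List.pyRange 1 (count + 1) 1).foldl (fun acc i => acc + i * price) 0
  let answer := final_price - money
  if answer < 0 then 0 else answer

-- ===== PORT B =====
def solution_alt (price : Int) (money : Int) (count : Int) : Int :=
  let n : Int := if count > 0 then count else 0
  let total : Int := PySem.Int.floordiv (price * n * (n + 1)) 2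
  let shortfall := total - money
  if shortfall > 0 then shortfall else 0

-- ===== PRECONDITION & SPEC =====
def Spec_solution (price : Int) (money : Int) (count : Int) (out : Int) : Prop := out = solution_alt price money count
instance (price : Int) (money : Int) (count : Int) (out : Int) : Decidable (Spec_solution price money count out) := by unfold Spec_solution; infer_instance

-- ===== CLAIM (what is proved, stated in full; the proofs are below) =====
def Claim_equal_solution : Prop := ∀ (price : Int) (money : Int) (count : Int), Dom_solution price money count → Spec_solution price money count (solution price money count)

-- ===== LEMMAS AND PROOFS =====

theorem pv_foldl_shift (price acc : Int) (l : List Int) :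
    l.foldl (fun a i => a + i * price) acc = acc + l.foldl (fun a i => a + i * price) 0 := by
  induction l generalizing acc with
  | nil => simp
  | cons x xs ih => simp only [List.foldl_cons]; rw [ih, ih (0 + x * price)]; ring

theorem pv_sum_range (price : Int) (m : Nat) :
    (PySem.List.pyRange 1 ((m : Int) + 1) 1).foldl (fun a i => a + i * price) 0
      = price * m * (m + 1) / 2 := by
  induction m with
  | zero => simp [PySem.List.pyRange]
  | succ k ih =>
    have h : PySem.List.pyRange 1 ((k : Int) + 1 + 1) 1
        = PySem.List.pyRange 1 ((k : Int) + 1) 1 ++ [(k : Int) + 1] := by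
      rw [PySem.List.pyRange_one_succ_right (by omega)]
    push_cast
    rw [h, List.foldl_append, pv_foldl_shift, ih]
    have h2 : (2 : Int) ∣ price * k * (k + 1) := by
      rcases Int.even_or_odd (k : Int) with he | ho
      · obtain ⟨t, ht⟩ := he
        exact ⟨price * t * (k + 1), by rw [ht]; ring⟩
      · obtain ⟨t, ht⟩ := ho
        exact ⟨price * k * (t + 1), by rw [ht]; ring⟩
    have h3 : (2 : Int) ∣ price * (k + 1) * (k + 1 + 1) := by
      rcases Int.even_or_odd (k : Int) with he | ho
      · obtain ⟨t, ht⟩ := he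
        exact ⟨price * (k + 1) * (t + 1), by rw [ht]; ring⟩
      · obtain ⟨t, ht⟩ := ho
        exact ⟨price * (t + 1) * (k + 1 + 1), by rw [ht]; ring⟩
    obtain ⟨u, hu⟩ := h2
    obtain ⟨v, hv⟩ := h3
    rw [hu, hv, Int.mul_ediv_cancel_left _ (by norm_num), Int.mul_ediv_cancel_left _ (by norm_num)]
    simp only [List.foldl_cons, List.foldl_nil, zero_add]
    nlinarith [hu, hv]

theorem solution_spec : Claim_equal_solution := by
  intro price money count _
  unfold Spec_solution solution solution_alt
  simp only []
  by_cases hc : count > 0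
  · have hn : (if count > 0 then count else 0) = count := if_pos hc
    rw [hn]
    obtain ⟨m, hm⟩ := Int.eq_ofNat_of_zero_le (le_of_lt hc)
    rw [PySem.Int.floordiv_eq_ediv_of_pos (by norm_num), hm, pv_sum_range]
    omega
  · have hempty : PySem.List.pyRange 1 (count + 1) 1 = [] := by
      rw [PySem.List.pyRange_one]
      simp
      omega
    rw [hempty, if_neg hc]
    simp [PySem.Int.floordiv]
    omega
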